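-- pv_equiv track=rewrite | github.com/Verazjy/DAMM-files | codings/network_utils.py | _simple_feature_columns
-- ===== SOURCE A (Python) =====
-- def _simple_feature_columns(fconfigs, num_codistill):
--     return not any(
--         fc.get('embedding_type', 'combine').startswith('sequence_')
--         for fc in fconfigs) and all(
--             set([
--                 fc.get('decorator', 'identity'),
--                 fc.get('sequence_decorator', 'identity')
--             ]) == set(['identity']) for fc in fconfigs) and num_codistill == 1
-- ===== SOURCE B (Python) =====
-- def _simple_feature_columns(fconfigs, num_codistill):
--     # B: aggregate every relevant value across all configs into two global sets,
--     # then decide once by set algebra instead of per-config boolean tests.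
--     decorators = set()
--     prefixes = set()
--     for fc in fconfigs:
--         decorators.add(fc.get('decorator', 'identity'))
--         decorators.add(fc.get('sequence_decorator', 'identity'))
--         prefixes.add(fc.get('embedding_type', 'combine')[:len('sequence_')])
--     return num_codistill == 1 and decorators <= {'identity'} \
--         and 'sequence_' not in prefixes
-- ===== Notes on version B (the rewrite author's own statement) =====
-- stated objective: alternative
-- what changed: Instead of A's per-config any/all boolean passes, B aggregates all decorator values and all 9-char embedding_type prefixes into two global sets in one pass and decides by set algebra: decorators <= {'identity'} and 'sequence_' not in prefixes.
import Mathlib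
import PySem

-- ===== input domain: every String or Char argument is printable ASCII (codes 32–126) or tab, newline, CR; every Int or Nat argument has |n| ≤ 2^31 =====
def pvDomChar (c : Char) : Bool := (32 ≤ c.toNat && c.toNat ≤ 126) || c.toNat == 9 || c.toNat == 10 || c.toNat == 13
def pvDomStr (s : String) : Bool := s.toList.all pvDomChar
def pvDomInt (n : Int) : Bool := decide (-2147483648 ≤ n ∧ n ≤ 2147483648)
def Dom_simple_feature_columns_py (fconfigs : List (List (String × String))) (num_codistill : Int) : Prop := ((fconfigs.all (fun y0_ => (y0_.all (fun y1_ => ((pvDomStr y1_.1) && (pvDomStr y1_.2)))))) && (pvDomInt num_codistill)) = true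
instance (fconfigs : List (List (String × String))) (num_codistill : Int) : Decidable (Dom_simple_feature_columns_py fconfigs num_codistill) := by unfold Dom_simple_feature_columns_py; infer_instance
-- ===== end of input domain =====

-- B aggregates all decorator values and all 9-char embedding_type prefixes into two
-- global sets in one pass and decides by set algebra (objective: alternative).


-- ===== PORT A =====
def simple_feature_columns_py (fconfigs : List (List (String × String))) (num_codistill : Int) : Bool :=
  (!(fconfigs.any (fun fc =>
      PySem.Str.startswith ((PySem.Dict.mk fc).getD "embedding_type" "combine") "sequence_")))
  && (fconfigs.all (fun fc =>
      PySem.Set.equal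
        (PySem.Set.ofList [(PySem.Dict.mk fc).getD "decorator" "identity",
                           (PySem.Dict.mk fc).getD "sequence_decorator" "identity"])
        (PySem.Set.ofList ["identity"])))
  && (num_codistill == 1)

-- ===== PORT B =====
-- loop body of Source B: add both decorator values to acc.1 and the
-- embedding_type[:len('sequence_')] prefix to acc.2
def sfcStep (acc : PySem.Set String × PySem.Set String) (fc : List (String × String)) :
    PySem.Set String × PySem.Set String :=
  (PySem.Set.add
     (PySem.Set.add acc.1 ((PySem.Dict.mk fc).getD "decorator" "identity"))
     ((PySem.Dict.mk fc).getD "sequence_decorator" "identity"),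
   PySem.Set.add acc.2
     (PySem.Str.slice ((PySem.Dict.mk fc).getD "embedding_type" "combine") none
        (some (PySem.Str.len "sequence_"))))

def simple_feature_columns_py_alt (fconfigs : List (List (String × String))) (num_codistill : Int) : Bool :=
  let agg := fconfigs.foldl sfcStep (PySem.Set.empty, PySem.Set.empty)
  (num_codistill == 1)
  && PySem.Set.issubset agg.1 (PySem.Set.ofList ["identity"])
  && !(PySem.Set.contains agg.2 "sequence_")

-- ===== PRECONDITION & SPEC =====
def Spec_simple_feature_columns_py (fconfigs : List (List (String × String))) (num_codistill : Int) (out : Bool) : Prop := out = simple_feature_columns_py_alt fconfigs num_codistill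
instance (fconfigs : List (List (String × String))) (num_codistill : Int) (out : Bool) : Decidable (Spec_simple_feature_columns_py fconfigs num_codistill out) := by unfold Spec_simple_feature_columns_py; infer_instance

-- ===== CLAIM (what is proved, stated in full; the proofs are below) =====
def Claim_equal_simple_feature_columns_py : Prop := ∀ (fconfigs : List (List (String × String))) (num_codistill : Int), Dom_simple_feature_columns_py fconfigs num_codistill → Spec_simple_feature_columns_py fconfigs num_codistill (simple_feature_columns_py fconfigs num_codistill)

-- ===== LEMMAS AND PROOFS =====
theorem mem_sfcFold_fst (l : List (List (String × String)))
    (acc : PySem.Set String × PySem.Set String) (x : String) :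
    x ∈ (l.foldl sfcStep acc).1 ↔ x ∈ acc.1 ∨ ∃ fc ∈ l,
      x = (PySem.Dict.mk fc).getD "decorator" "identity" ∨
      x = (PySem.Dict.mk fc).getD "sequence_decorator" "identity" := by
  induction l generalizing acc with
  | nil => simp
  | cons fc rest ih =>
    simp [List.foldl_cons, ih, sfcStep, PySem.Set.mem_add, or_assoc]

theorem mem_sfcFold_snd (l : List (List (String × String)))
    (acc : PySem.Set String × PySem.Set String) (x : String) :
    x ∈ (l.foldl sfcStep acc).2 ↔ x ∈ acc.2 ∨ ∃ fc ∈ l,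
      x = PySem.Str.slice ((PySem.Dict.mk fc).getD "embedding_type" "combine") none
            (some (PySem.Str.len "sequence_")) := by
  induction l generalizing acc with
  | nil => simp
  | cons fc rest ih =>
    simp [List.foldl_cons, ih, sfcStep, PySem.Set.mem_add, or_assoc]

-- embedding_type[:len('sequence_')] == 'sequence_'  ↔  embedding_type.startswith('sequence_')
theorem slice9_eq_iff (s : String) :
    PySem.Str.slice s none (some (PySem.Str.len "sequence_")) = "sequence_" ↔
      PySem.Str.startswith s "sequence_" = true := by
  rw [← String.toList_inj]
  have h : (PySem.Str.slice s none (some (PySem.Str.len "sequence_"))).toList = s.toList.take 9 := by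
    simp [PySem.Str.slice]
    rw [show (9:Int) = ((9:Nat):Int) from rfl, PySem.List.slice_to_natCast]
  rw [h, PySem.Str.startswith_eq, PySem.Chars.startswith_iff, List.prefix_iff_eq_take]
  have hl : ("sequence_".toList).length = 9 := by decide
  constructor
  · intro hh
    have h9 : (s.toList.take 9).length = 9 := by rw [hh]; exact hl
    rw [← hh, h9]
  · intro hh
    rw [hl] at hh
    exact hh.symm

-- A's per-config test: set([d, sd]) == set(['identity']) ↔ both values are 'identity'
theorem equal_pair_iff (a b : String) :
    PySem.Set.equal (PySem.Set.ofList [a, b]) (PySem.Set.ofList ["identity"]) = true ↔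
      (a = "identity" ∧ b = "identity") := by
  rw [PySem.Set.equal_iff]
  simp only [PySem.Set.mem_ofList, List.mem_cons, List.not_mem_nil, or_false]
  constructor
  · intro h
    exact ⟨(h a).1 (Or.inl rfl), (h b).1 (Or.inr rfl)⟩
  · rintro ⟨rfl, rfl⟩ x
    tauto

-- the common propositional reading of both programs
theorem a_iff (fconfigs : List (List (String × String))) (n : Int) :
    simple_feature_columns_py fconfigs n = true ↔
      (n = 1 ∧
        (∀ fc ∈ fconfigs,
          (PySem.Dict.mk fc).getD "decorator" "identity" = "identity" ∧
          (PySem.Dict.mk fc).getD "sequence_decorator" "identity" = "identity") ∧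
        (∀ fc ∈ fconfigs,
          PySem.Str.startswith ((PySem.Dict.mk fc).getD "embedding_type" "combine") "sequence_" = false)) := by
  unfold simple_feature_columns_py
  simp only [Bool.and_eq_true, Bool.not_eq_true', List.any_eq_false, List.all_eq_true,
    beq_iff_eq, equal_pair_iff]
  constructor
  · rintro ⟨⟨h1, h2⟩, hn⟩
    exact ⟨hn, h2, fun fc hfc => Bool.eq_false_iff.mpr (h1 fc hfc)⟩
  · rintro ⟨hn, h2, h1⟩
    exact ⟨⟨fun fc hfc => Bool.eq_false_iff.mp (h1 fc hfc), h2⟩, hn⟩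

theorem alt_iff (fconfigs : List (List (String × String))) (n : Int) :
    simple_feature_columns_py_alt fconfigs n = true ↔
      (n = 1 ∧
        (∀ fc ∈ fconfigs,
          (PySem.Dict.mk fc).getD "decorator" "identity" = "identity" ∧
          (PySem.Dict.mk fc).getD "sequence_decorator" "identity" = "identity") ∧
        (∀ fc ∈ fconfigs,
          PySem.Str.startswith ((PySem.Dict.mk fc).getD "embedding_type" "combine") "sequence_" = false)) := by
  unfold simple_feature_columns_py_alt
  simp only [Bool.and_eq_true, Bool.not_eq_true', beq_iff_eq, PySem.Set.issubset_iff]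
  constructor
  · rintro ⟨⟨hn, hsub⟩, hnot⟩
    refine ⟨hn, ?_, ?_⟩
    · intro fc hfc
      constructor
      · have := hsub _ ((mem_sfcFold_fst _ _ _).2 (Or.inr ⟨fc, hfc, Or.inl rfl⟩))
        simpa [PySem.Set.mem_ofList] using this
      · have := hsub _ ((mem_sfcFold_fst _ _ _).2 (Or.inr ⟨fc, hfc, Or.inr rfl⟩))
        simpa [PySem.Set.mem_ofList] using this
    · intro fc hfc
      rw [← Bool.not_eq_true]
      intro hsw
      have hmem : ("sequence_" : String) ∈ (fconfigs.foldl sfcStep (PySem.Set.empty, PySem.Set.empty)).2 :=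
        (mem_sfcFold_snd _ _ _).2 (Or.inr ⟨fc, hfc, ((slice9_eq_iff _).2 hsw).symm⟩)
      rw [← PySem.Set.contains_iff] at hmem
      rw [hnot] at hmem
      exact Bool.false_ne_true hmem
  · rintro ⟨hn, hall, hno⟩
    refine ⟨⟨hn, ?_⟩, ?_⟩
    · intro x hx
      rw [mem_sfcFold_fst] at hx
      simp only [PySem.Set.mem_ofList, List.mem_cons, List.not_mem_nil, or_false]
      rcases hx with h | ⟨fc, hfc, h | h⟩
      · exact absurd h (List.not_mem_nil)
      · exact h.trans (hall fc hfc).1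
      · exact h.trans (hall fc hfc).2
    · have hnm : ("sequence_" : String) ∉ (fconfigs.foldl sfcStep (PySem.Set.empty, PySem.Set.empty)).2 := by
        intro hmem
        rw [mem_sfcFold_snd] at hmem
        rcases hmem with h | ⟨fc, hfc, h⟩
        · exact absurd h (List.not_mem_nil)
        · have := (slice9_eq_iff _).1 h.symm
          rw [hno fc hfc] at this
          exact Bool.false_ne_true this
      simp only [← PySem.Set.contains_iff] at hnm
      exact Bool.eq_false_iff.mpr hnm

-- ===== VERDICT (by name: the statement is the Claim_ definition above) =====
theorem simple_feature_columns_py_spec : Claim_equal_simple_feature_columns_py := by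
  intro fconfigs n _
  unfold Spec_simple_feature_columns_py
  rw [Bool.eq_iff_iff, a_iff, alt_iff]
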